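-- pv_equiv track=rewrite | github.com/peagaene/SCRIPTS | ITESP/memorial copy.py | infer_imolad_from_num
-- ===== SOURCE A (Python) =====
-- def infer_imolad_from_num(numero_val, fallback=None):
--     """
--     Deduz o lado (PAR/IMPAR) a partir do número do imóvel.
--     Se não for possível ler o número, devolve o fallback (campo IMOLAD original).
--     """
--     if numero_val is None:
--         return fallback or ""
--     num_str = str(numero_val).strip()
--     digits = "".join(ch for ch in num_str if ch.isdigit())
--     if not digits:
--         return fallback or ""
--     try:
--         num_int = int(digits)
--     except ValueError:
--         return fallback or ""
--     return "PAR" if num_int % 2 == 0 else "IMPAR"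
-- ===== SOURCE B (Python) =====
-- def infer_imolad_from_num(numero_val, fallback=None):
--     """
--     Deduz o lado (PAR/IMPAR) a partir do numero do imovel.
--     A paridade depende apenas do ULTIMO algarismo: varre a string uma vez,
--     de tras para frente, ate achar um digito; nao monta a string de digitos
--     nem converte o numero inteiro.
--     """
--     if numero_val is not None:
--         for ch in reversed(str(numero_val)):
--             if ch.isdigit():
--                 return "PAR" if (ord(ch) - 48) % 2 == 0 else "IMPAR"
--     return fallback or ""
-- ===== Notes on version B (the rewrite author's own statement) =====
-- stated objective: simpler
-- what changed: B drops A's collect-all-digits/join/int() pipeline and instead scans the string once in reverse for the last digit character, whose parity alone determines PAR/IMPAR.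
import Mathlib
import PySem

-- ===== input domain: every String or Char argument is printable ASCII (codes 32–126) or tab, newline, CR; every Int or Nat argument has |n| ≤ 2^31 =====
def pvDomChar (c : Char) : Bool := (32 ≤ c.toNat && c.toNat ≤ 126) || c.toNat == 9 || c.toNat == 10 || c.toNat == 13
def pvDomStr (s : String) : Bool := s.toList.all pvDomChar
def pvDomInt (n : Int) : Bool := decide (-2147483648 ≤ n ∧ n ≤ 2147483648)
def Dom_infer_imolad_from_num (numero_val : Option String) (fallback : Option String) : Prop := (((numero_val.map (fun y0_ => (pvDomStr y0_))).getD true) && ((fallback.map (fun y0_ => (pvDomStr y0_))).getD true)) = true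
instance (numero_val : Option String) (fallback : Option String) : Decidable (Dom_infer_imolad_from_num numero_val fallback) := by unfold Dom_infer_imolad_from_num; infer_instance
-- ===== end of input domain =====

-- B replaces A's collect-all-digits-then-int-then-mod pipeline by a single reverse
-- scan for the last digit character, whose parity alone decides PAR/IMPAR (simpler single reverse scan).

-- ===== PORT A =====
-- `fallback or ""` (a str-or-None is falsy iff None or empty)
def pyOrEmpty (fallback : Option String) : String :=
  match fallback with
  | none => ""
  | some f => if f = "" then "" else f

-- ord(ch) - 48, the value of an ASCII digit character
def digitVal (c : Char) : Int := (c.toNat : Int) - 48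

-- hand port of `int(digits)`: A only applies it to strings consisting solely of ASCII
-- digit characters '0'-'9' (the characters ch.isdigit() keeps on the ASCII domain);
-- on those int() is exactly the decimal value, ValueError (none) on the empty string.
def pyIntOfDigits? (ds : List Char) : Option Int :=
  match ds with
  | [] => none
  | _ :: _ => some (ds.foldl (fun a c => a * 10 + digitVal c) 0)

def infer_imolad_from_num (numero_val : Option String) (fallback : Option String) : String :=
  match numero_val with
  | none => pyOrEmpty fallback
  | some v =>
    let numStr := PySem.Str.strip v
    let digits := numStr.toList.filter PySem.Chars.isdigit
    if digits = [] then pyOrEmpty fallback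
    else
      match pyIntOfDigits? digits with
      | none => pyOrEmpty fallback
      | some numInt => if PySem.Int.mod numInt 2 = 0 then "PAR" else "IMPAR"

-- ===== PORT B =====
-- the `for ch in reversed(...)` loop of Source B: first digit of the reversed character list
def findDigitRev (cs : List Char) : Option Char :=
  match cs with
  | [] => none
  | c :: rest => if PySem.Chars.isdigit c then some c else findDigitRev rest

def infer_imolad_from_num_alt (numero_val : Option String) (fallback : Option String) : String :=
  match numero_val with
  | none => pyOrEmpty fallback
  | some v =>
    match findDigitRev v.toList.reverse with
    | some c => if PySem.Int.mod (digitVal c) 2 = 0 then "PAR" else "IMPAR"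
    | none => pyOrEmpty fallback

-- ===== PRECONDITION & SPEC =====
def Spec_infer_imolad_from_num (numero_val : Option String) (fallback : Option String) (out : String) : Prop := out = infer_imolad_from_num_alt numero_val fallback
instance (numero_val : Option String) (fallback : Option String) (out : String) : Decidable (Spec_infer_imolad_from_num numero_val fallback out) := by unfold Spec_infer_imolad_from_num; infer_instance

-- ===== CLAIM (what is proved, stated in full; the proofs are below) =====
def Claim_equal_infer_imolad_from_num : Prop := ∀ (numero_val : Option String) (fallback : Option String), Dom_infer_imolad_from_num numero_val fallback → Spec_infer_imolad_from_num numero_val fallback (infer_imolad_from_num numero_val fallback)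

-- ===== LEMMAS AND PROOFS =====

theorem isdigit_of_isspace (c : Char) (h : PySem.Chars.isspace c = true) :
    PySem.Chars.isdigit c = false := by
  simp only [PySem.Chars.isspace, Bool.or_eq_true, Bool.and_eq_true, decide_eq_true_eq] at h
  simp only [PySem.Chars.isdigit, Bool.and_eq_false_iff, decide_eq_false_iff_not, Char.le_def,
    UInt32.le_iff_toNat_le, Char.toNat] at h ⊢
  have h0 : ('0':Char).val.toNat = 48 := rfl
  have h9 : ('9':Char).val.toNat = 57 := rfl
  omega

theorem filter_dropWhile_isspace (l : List Char) :
    (l.dropWhile PySem.Chars.isspace).filter PySem.Chars.isdigit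
      = l.filter PySem.Chars.isdigit := by
  induction l with
  | nil => rfl
  | cons c l ih =>
    by_cases h : PySem.Chars.isspace c = true
    · simp [h, ih, isdigit_of_isspace c h]
    · simp [h]

theorem strip_filter (l : List Char) :
    (PySem.Chars.strip l).filter PySem.Chars.isdigit = l.filter PySem.Chars.isdigit := by
  simp [PySem.Chars.strip, PySem.Chars.lstrip, PySem.Chars.rstrip,
    List.filter_reverse, filter_dropWhile_isspace]

theorem findDigitRev_eq (cs : List Char) :
    findDigitRev cs = (cs.filter PySem.Chars.isdigit).head? := by
  induction cs with
  | nil => rfl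
  | cons c rest ih =>
    by_cases h : PySem.Chars.isdigit c = true
    · simp [findDigitRev, h]
    · simp [findDigitRev, h, ih]

theorem mod2_foldl (ds : List Char) (d : Char) :
    PySem.Int.mod ((ds ++ [d]).foldl (fun a c => a * 10 + digitVal c) 0) 2
      = PySem.Int.mod (digitVal d) 2 := by
  rw [List.foldl_append]
  simp only [List.foldl, PySem.Int.mod, Int.fmod_eq_emod]
  omega

-- ===== VERDICT (by name: the statement is the Claim_ definition above) =====
theorem infer_imolad_from_num_spec : Claim_equal_infer_imolad_from_num := by
  intro numero_val fallback _
  unfold Spec_infer_imolad_from_num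
  match numero_val with
  | none => rfl
  | some v =>
    simp only [infer_imolad_from_num, infer_imolad_from_num_alt]
    rw [findDigitRev_eq, List.filter_reverse, List.head?_reverse]
    have hd : (PySem.Str.strip v).toList.filter PySem.Chars.isdigit
        = v.toList.filter PySem.Chars.isdigit := by
      rw [PySem.Str.toList_strip, strip_filter]
    rw [hd]
    rcases hds : v.toList.filter PySem.Chars.isdigit with _ | ⟨c, rest⟩
    · rfl
    · have hne : (c :: rest : List Char) ≠ [] := by simp
      have hlast : ∃ d, (c :: rest).getLast? = some d := by
        cases h : (c :: rest).getLast? with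
        | none => exact absurd (List.getLast?_eq_none_iff.mp h) hne
        | some d => exact ⟨d, rfl⟩
      obtain ⟨d, hd2⟩ := hlast
      have hsplit : (c :: rest : List Char) = (c :: rest).dropLast ++ [d] := by
        conv_lhs => rw [← List.dropLast_append_getLast hne]
        rw [List.getLast_eq_iff_getLast?_eq_some hne |>.mpr hd2]
      simp only [if_neg (by simp : ¬ (c :: rest : List Char) = [])]
      rw [hd2]
      simp only [pyIntOfDigits?]
      rw [hsplit, mod2_foldl]
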